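-- pv_equiv track=rewrite | github.com/xuetingandyang/leetcode | quoraOA/seperateArray.py | seperateArray
-- ===== SOURCE A (Python) =====
-- from typing import List
--
-- def seperateArray(array: List[int]) -> List[List[int]]:
--     """
--     separate array into 2 sub-arrays.
--     with each sub-array has unique values
--     """
--
--     if array is None or len(array) % 2 != 0:
--         return []
--
--     rst = [[],[]]
--
--     array = sorted(array)
--
--     for i in range(len(array)):
--         rst[i % 2].append(array[i])
--         if i // 2 - 1 >= 0 and rst[i % 2][i // 2] == rst[i % 2][i //2 - 1]:
--             return []
--     return rst
-- ===== SOURCE B (Python) =====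
-- from typing import List
--
-- def seperateArray(array: List[int]) -> List[List[int]]:
--     """
--     separate array into 2 sub-arrays.
--     with each sub-array has unique values
--     """
--
--     if array is None or len(array) % 2 != 0:
--         return []
--
--     s = sorted(array)
--
--     counts = {}
--     for v in s:
--         counts[v] = counts.get(v, 0) + 1
--     if any(c >= 3 for c in counts.values()):
--         return []
--
--     return [[s[i] for i in range(0, len(s), 2)],
--             [s[i] for i in range(1, len(s), 2)]]
-- ===== Notes on version B (the rewrite author's own statement) =====
-- stated objective: alternative
-- what changed: A detects duplicates by comparing each appended element with its predecessor inside one interleaved append loop with early return; B builds a frequency table over the sorted array, returns the empty result if any value occurs three or more times, and otherwise constructs the two subarrays directly by even/odd index comprehensions.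
import Mathlib
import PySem

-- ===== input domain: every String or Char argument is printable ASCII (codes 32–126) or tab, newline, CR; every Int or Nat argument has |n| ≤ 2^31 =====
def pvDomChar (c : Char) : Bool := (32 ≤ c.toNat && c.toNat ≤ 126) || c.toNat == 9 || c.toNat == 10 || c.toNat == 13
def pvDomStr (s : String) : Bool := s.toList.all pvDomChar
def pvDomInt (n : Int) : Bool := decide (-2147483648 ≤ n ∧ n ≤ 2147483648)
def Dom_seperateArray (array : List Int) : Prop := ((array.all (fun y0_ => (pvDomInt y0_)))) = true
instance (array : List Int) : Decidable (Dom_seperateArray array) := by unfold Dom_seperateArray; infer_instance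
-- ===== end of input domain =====

-- B replaces A's interleaved append-loop (neighbour comparison + early return) by a frequency
-- table over the sorted array plus even/odd index comprehensions; objective: alternative.

-- ===== PORT A =====
-- one iteration of A's 'for i in range(len(array))' loop; none = the early 'return []'
def seperateArrayStep (arr : List Int) (st : Option (List Int × List Int)) (i : Int) :
    Option (List Int × List Int) :=
  match st with
  | none => none
  | some (r0, r1) =>
    if PySem.Int.mod i 2 = 0 then
      let r0' := r0 ++ [PySem.List.pyGetD arr i 0]   -- index always in range in A's loop
      if PySem.Int.floordiv i 2 - 1 ≥ 0 ∧
          PySem.List.pyGetD r0' (PySem.Int.floordiv i 2) 0 =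
            PySem.List.pyGetD r0' (PySem.Int.floordiv i 2 - 1) 0 then none
      else some (r0', r1)
    else
      let r1' := r1 ++ [PySem.List.pyGetD arr i 0]
      if PySem.Int.floordiv i 2 - 1 ≥ 0 ∧
          PySem.List.pyGetD r1' (PySem.Int.floordiv i 2) 0 =
            PySem.List.pyGetD r1' (PySem.Int.floordiv i 2 - 1) 0 then none
      else some (r0, r1')

def seperateArray (array : List Int) : List (List Int) :=
  if PySem.Int.mod (PySem.List.len array) 2 ≠ 0 then []
  else
    let arr := PySem.List.sorted array (fun x => x) false
    match (PySem.List.pyRange 0 (PySem.List.len arr) 1).foldl (seperateArrayStep arr)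
        (some ([], [])) with
    | none => []
    | some (r0, r1) => [r0, r1]

-- ===== PORT B =====
def seperateArray_alt (array : List Int) : List (List Int) :=
  if PySem.Int.mod (PySem.List.len array) 2 ≠ 0 then []
  else
    let s := PySem.List.sorted array (fun x => x) false
    let counts := s.foldl (fun d v => d.insert v (d.getD v 0 + 1))
      (PySem.Dict.empty : PySem.Dict Int Int)
    if counts.values.any (fun c => decide (3 ≤ c)) then []
    else [(PySem.List.pyRange 0 (PySem.List.len s) 2).map (fun i => PySem.List.pyGetD s i 0),
          (PySem.List.pyRange 1 (PySem.List.len s) 2).map (fun i => PySem.List.pyGetD s i 0)]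

-- ===== PRECONDITION & SPEC =====
def Spec_seperateArray (array : List Int) (out : List (List Int)) : Prop := out = seperateArray_alt array
instance (array : List Int) (out : List (List Int)) : Decidable (Spec_seperateArray array out) := by unfold Spec_seperateArray; infer_instance

-- ===== CLAIM (what is proved, stated in full; the proofs are below) =====
def Claim_equal_seperateArray : Prop := ∀ (array : List Int), Dom_seperateArray array → Spec_seperateArray array (seperateArray array)

-- ===== LEMMAS AND PROOFS =====

-- even-index and odd-index elements among the first k entries of s
def pvE (s : List Int) (k : Nat) : List Int := (List.range ((k + 1) / 2)).map (fun j => s.getD (2 * j) 0)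
def pvO (s : List Int) (k : Nat) : List Int := (List.range (k / 2)).map (fun j => s.getD (2 * j + 1) 0)
-- some index i < k has s[i] = s[i-2]
def pvBad (s : List Int) (k : Nat) : Bool :=
  (List.range k).any (fun i => decide (2 ≤ i) && (s.getD i 0 == s.getD (i - 2) 0))

lemma pvBad_succ (s : List Int) (k : Nat) :
    pvBad s (k + 1) = (pvBad s k || (decide (2 ≤ k) && (s.getD k 0 == s.getD (k - 2) 0))) := by
  simp [pvBad, List.range_succ]

lemma pvE_getD (s : List Int) (k j : Nat) (h : j < (k + 1) / 2) :
    (pvE s k).getD j 0 = s.getD (2 * j) 0 := by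
  simp [pvE, List.getD, h]

lemma pvO_getD (s : List Int) (k j : Nat) (h : j < k / 2) :
    (pvO s k).getD j 0 = s.getD (2 * j + 1) 0 := by
  simp [pvO, List.getD, h]

lemma pvE_succ_even (s : List Int) (k : Nat) (h : k % 2 = 0) :
    pvE s (k + 1) = pvE s k ++ [s.getD k 0] := by
  unfold pvE
  rw [show (k + 1 + 1) / 2 = (k + 1) / 2 + 1 by omega, List.range_succ, List.map_append]
  simp only [List.map_cons, List.map_nil]
  rw [show 2 * ((k + 1) / 2) = k by omega]

lemma pvO_succ_even (s : List Int) (k : Nat) (h : k % 2 = 0) :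
    pvO s (k + 1) = pvO s k := by
  unfold pvO
  rw [show (k + 1) / 2 = k / 2 by omega]

lemma pvE_succ_odd (s : List Int) (k : Nat) (h : k % 2 = 1) :
    pvE s (k + 1) = pvE s k := by
  unfold pvE
  rw [show (k + 1 + 1) / 2 = (k + 1) / 2 by omega]

lemma pvO_succ_odd (s : List Int) (k : Nat) (h : k % 2 = 1) :
    pvO s (k + 1) = pvO s k ++ [s.getD k 0] := by
  unfold pvO
  rw [show (k + 1) / 2 = k / 2 + 1 by omega, List.range_succ, List.map_append]
  simp only [List.map_cons, List.map_nil]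
  rw [show 2 * (k / 2) + 1 = k by omega]

lemma step_some (s : List Int) (k : Nat) :
    seperateArrayStep s (some (pvE s k, pvO s k)) (k : Int) =
      if (decide (2 ≤ k) && (s.getD k 0 == s.getD (k - 2) 0)) = true then none
      else some (pvE s (k + 1), pvO s (k + 1)) := by
  have hm : PySem.Int.mod (k : Int) 2 = ((k % 2 : Nat) : Int) := by
    exact_mod_cast PySem.Int.mod_natCast k 2
  have hf : PySem.Int.floordiv (k : Int) 2 = ((k / 2 : Nat) : Int) := by
    exact_mod_cast PySem.Int.floordiv_natCast k 2
  have hg : PySem.List.pyGetD s (k : Int) 0 = s.getD k 0 := PySem.List.pyGetD_natCast s k 0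
  rcases Nat.mod_two_eq_zero_or_one k with hk | hk
  · -- k even: append to r0
    show (if PySem.Int.mod (k : Int) 2 = 0 then _ else _) = _
    rw [hm, hk, if_pos (by norm_num)]
    rw [hg, hf]
    have hlen : (pvE s k).length = k / 2 := by simp [pvE]; omega
    have hidx1 : PySem.List.pyGetD (pvE s k ++ [s.getD k 0]) ((k / 2 : Nat) : Int) 0 = s.getD k 0 := by
      rw [PySem.List.pyGetD_natCast, List.getD, ← hlen, List.getElem?_concat_length]
      rfl
    by_cases h2 : 2 ≤ k
    · have hidx2 : PySem.List.pyGetD (pvE s k ++ [s.getD k 0]) (((k / 2 : Nat) : Int) - 1) 0 = s.getD (k - 2) 0 := by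
        rw [show (((k / 2 : Nat) : Int) - 1) = ((k / 2 - 1 : Nat) : Int) by omega]
        rw [PySem.List.pyGetD_natCast, List.getD, List.getElem?_append_left (by omega : k / 2 - 1 < (pvE s k).length)]
        rw [← List.getD, pvE_getD s k (k / 2 - 1) (by omega)]
        congr 1
        omega
      by_cases heq : s.getD k 0 = s.getD (k - 2) 0
      · rw [if_pos ⟨by omega, by rw [hidx1, hidx2]; exact heq⟩]
        rw [if_pos (by simp only [Bool.and_eq_true, decide_eq_true_eq, beq_iff_eq]; exact ⟨h2, heq⟩)]
      · rw [if_neg (by rw [hidx1, hidx2]; exact fun hc => heq hc.2)]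
        rw [if_neg (fun hc => heq (by simpa using (Bool.and_elim_right hc)))]
        rw [pvE_succ_even s k hk, pvO_succ_even s k hk]
    · rw [if_neg (by rw [hidx1]; exact fun hc => h2 ((by omega : (0:Int) ≤ ((k/2:Nat):Int) - 1 → 2 ≤ k) hc.1))]
      rw [if_neg (fun hc => h2 (by simpa using (Bool.and_elim_left hc)))]
      rw [pvE_succ_even s k hk, pvO_succ_even s k hk]
  · -- k odd: append to r1
    show (if PySem.Int.mod (k : Int) 2 = 0 then _ else _) = _
    rw [hm, hk, if_neg (by norm_num)]
    rw [hg, hf]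
    have hlen : (pvO s k).length = k / 2 := by simp [pvO]
    have hidx1 : PySem.List.pyGetD (pvO s k ++ [s.getD k 0]) ((k / 2 : Nat) : Int) 0 = s.getD k 0 := by
      rw [PySem.List.pyGetD_natCast, List.getD, ← hlen, List.getElem?_concat_length]
      rfl
    by_cases h2 : 2 ≤ k
    · have hidx2 : PySem.List.pyGetD (pvO s k ++ [s.getD k 0]) (((k / 2 : Nat) : Int) - 1) 0 = s.getD (k - 2) 0 := by
        rw [show (((k / 2 : Nat) : Int) - 1) = ((k / 2 - 1 : Nat) : Int) by omega]
        rw [PySem.List.pyGetD_natCast, List.getD, List.getElem?_append_left (by omega : k / 2 - 1 < (pvO s k).length)]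
        rw [← List.getD, pvO_getD s k (k / 2 - 1) (by omega)]
        congr 1
        omega
      by_cases heq : s.getD k 0 = s.getD (k - 2) 0
      · rw [if_pos ⟨by omega, by rw [hidx1, hidx2]; exact heq⟩]
        rw [if_pos (by simp only [Bool.and_eq_true, decide_eq_true_eq, beq_iff_eq]; exact ⟨h2, heq⟩)]
      · rw [if_neg (by rw [hidx1, hidx2]; exact fun hc => heq hc.2)]
        rw [if_neg (fun hc => heq (by simpa using (Bool.and_elim_right hc)))]
        rw [pvE_succ_odd s k hk, pvO_succ_odd s k hk]
    · rw [if_neg (by rw [hidx1]; exact fun hc => h2 ((by omega : (0:Int) ≤ ((k/2:Nat):Int) - 1 → 2 ≤ k) hc.1))]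
      rw [if_neg (fun hc => h2 (by simpa using (Bool.and_elim_left hc)))]
      rw [pvE_succ_odd s k hk, pvO_succ_odd s k hk]

lemma loopInv (s : List Int) (k : Nat) :
    (PySem.List.pyRange 0 (k : Int) 1).foldl (seperateArrayStep s) (some ([], [])) =
      if pvBad s k then none else some (pvE s k, pvO s k) := by
  induction k with
  | zero =>
    rw [Nat.cast_zero, PySem.List.pyRange_one_eq_nil (le_refl 0)]
    simp [pvBad, pvE, pvO]
  | succ k ih =>
    rw [show ((k + 1 : Nat) : Int) = (k : Int) + 1 by push_cast; ring]
    rw [PySem.List.pyRange_one_succ_right (Int.natCast_nonneg k)]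
    rw [List.foldl_append, ih]
    by_cases hb : pvBad s k = true
    · rw [if_pos hb]
      have hb1 : pvBad s (k + 1) = true := by rw [pvBad_succ, hb]; simp
      rw [if_pos hb1]
      rfl
    · have hbf : pvBad s k = false := by simpa using hb
      rw [hbf]
      simp only [List.foldl_cons, List.foldl_nil, Bool.false_eq_true, if_false]
      rw [step_some s k, pvBad_succ, hbf, Bool.false_or]

-- second occurrence at a positive index
lemma count_two (v : Int) (t : List Int) (h : 2 ≤ t.count v) :
    ∃ j, 1 ≤ j ∧ j < t.length ∧ t.getD j 0 = v := by
  induction t with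
  | nil => simp at h
  | cons y u ih =>
    by_cases hy : y = v
    · subst hy
      rw [List.count_cons_self] at h
      have h1 : 1 ≤ u.count y := by omega
      have hv : y ∈ u := List.count_pos_iff.mp h1
      obtain ⟨j, hj, hval⟩ := List.mem_iff_getElem.mp hv
      refine ⟨j + 1, by omega, by simp; omega, ?_⟩
      simp [List.getD, List.getElem?_eq_getElem hj, hval]
    · have h2 : 2 ≤ u.count v := by
        rw [List.count_cons_of_ne hy] at h; exact h
      obtain ⟨j, h1, h2', h3⟩ := ih h2
      exact ⟨j + 1, by omega, by simp; omega, by simpa [List.getD] using h3⟩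

lemma count_three (v : Int) (s : List Int) (h : 3 ≤ s.count v) :
    ∃ a c : Nat, a + 2 ≤ c ∧ c < s.length ∧ s.getD a 0 = v ∧ s.getD c 0 = v := by
  induction s with
  | nil => simp at h
  | cons x u ih =>
    by_cases hx : x = v
    · subst hx
      rw [List.count_cons_self] at h
      obtain ⟨j, hj1, hj2, hj3⟩ := count_two x u (by omega)
      exact ⟨0, j + 1, by omega, by simp; omega, by simp, by simpa [List.getD] using hj3⟩
    · have h3 : 3 ≤ u.count v := by rw [List.count_cons_of_ne hx] at h; exact h
      obtain ⟨a, c, h1, h2, h4, h5⟩ := ih h3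
      exact ⟨a + 1, c + 1, by omega, by simp; omega,
        by simpa [List.getD] using h4, by simpa [List.getD] using h5⟩

-- on a sorted list, a value of multiplicity >= 3 is the same as an index pair (i, i-2) with equal values
lemma pvBad_iff_count (s : List Int) (hs : s.Pairwise (· ≤ ·)) :
    pvBad s s.length = true ↔ ∃ v ∈ s, 3 ≤ s.count v := by
  have mono : ∀ p q : Nat, ∀ _hpq : p ≤ q, ∀ hq : q < s.length,
      s[p]'(by omega) ≤ s[q]'hq := by
    intro p q hpq hq
    rcases Nat.eq_or_lt_of_le hpq with h | h
    · subst h; exact le_refl _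
    · exact List.pairwise_iff_getElem.mp hs p q (by omega) hq h
  constructor
  · intro hb
    simp only [pvBad, List.any_eq_true, List.mem_range, Bool.and_eq_true, decide_eq_true_eq,
      beq_iff_eq] at hb
    obtain ⟨i, hi, h2, heq⟩ := hb
    rw [List.getD_eq_getElem s 0 hi, List.getD_eq_getElem s 0 (by omega : i - 2 < s.length)] at heq
    refine ⟨s[i], List.getElem_mem hi, ?_⟩
    -- the three entries i-2, i-1, i are all equal to s[i]
    have e1 : s[i - 2]'(by omega) = s[i] := heq.symm
    have le1 : s[i - 2]'(by omega) ≤ s[i - 1]'(by omega) := mono (i - 2) (i - 1) (by omega) (by omega)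
    have le2 : s[i - 1]'(by omega) ≤ s[i] := mono (i - 1) i (by omega) hi
    have e2 : s[i - 1]'(by omega) = s[i] := le_antisymm le2 (e1 ▸ le1)
    have hd : List.drop (i - 2) s = s[i - 2]'(by omega) :: s[i - 1]'(by omega) :: s[i] :: List.drop (i + 1) s := by
      rw [List.drop_eq_getElem_cons (by omega : i - 2 < s.length)]
      rw [show i - 2 + 1 = i - 1 by omega, List.drop_eq_getElem_cons (by omega : i - 1 < s.length)]
      rw [show i - 1 + 1 = i by omega, List.drop_eq_getElem_cons hi]
    have hcle := List.Sublist.count_le s[i] (List.drop_sublist (i - 2) s)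
    have h3 : 3 ≤ List.count s[i] (List.drop (i - 2) s) := by
      rw [hd, e1, e2]
      simp only [List.count_cons_self]
      omega
    omega
  · intro ⟨v, hv, hc⟩
    obtain ⟨a, c, hac, hcn, ha, hcv⟩ := count_three v s hc
    simp only [pvBad, List.any_eq_true, List.mem_range, Bool.and_eq_true, decide_eq_true_eq,
      beq_iff_eq]
    refine ⟨c, hcn, by omega, ?_⟩
    rw [List.getD_eq_getElem s 0 hcn, List.getD_eq_getElem s 0 (by omega : c - 2 < s.length)]
    rw [List.getD_eq_getElem s 0 hcn] at hcv
    rw [List.getD_eq_getElem s 0 (by omega : a < s.length)] at ha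
    have l1 : s[a]'(by omega) ≤ s[c - 2]'(by omega) := mono a (c - 2) (by omega) (by omega)
    have l2 : s[c - 2]'(by omega) ≤ s[c]'hcn := mono (c - 2) c (by omega) hcn
    rw [ha] at l1
    omega

lemma counts_any_iff (s : List Int) :
    ((s.foldl (fun d v => d.insert v (d.getD v 0 + 1)) (PySem.Dict.empty : PySem.Dict Int Int)).values.any
        (fun c => decide (3 ≤ c)) = true) ↔ ∃ v ∈ s, 3 ≤ s.count v := by
  rw [PySem.Dict.foldl_insert_getD_add_one_eq_counter]
  have hv : (PySem.Dict.counter s).values = (PySem.Dict.counter s).items.map (·.2) := rfl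
  rw [hv, PySem.Dict.items_counter]
  simp only [List.map_map, List.any_eq_true, List.mem_map, Function.comp]
  constructor
  · rintro ⟨x, ⟨v, hv', rfl⟩, hd⟩
    exact ⟨v, (PySem.Set.mem_ofList _ _).mp hv', by simpa using hd⟩
  · rintro ⟨v, hv', hc⟩
    exact ⟨(v, (s.count v : Int)).2, ⟨v, (PySem.Set.mem_ofList _ _).mpr hv', rfl⟩, by simpa using hc⟩

lemma evens_eq (s : List Int) :
    (PySem.List.pyRange 0 (s.length : Int) 2).map (fun i => PySem.List.pyGetD s i 0) =
      pvE s s.length := by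
  rw [PySem.List.pyRange_of_pos 0 (s.length : Int) (by norm_num)]
  have hcount : (if (0:Int) < (s.length : Int) then (((s.length : Int) - 0 + 2 - 1) / 2).toNat else 0)
      = (s.length + 1) / 2 := by
    by_cases h : 0 < s.length
    · rw [if_pos (by exact_mod_cast h)]; omega
    · rw [if_neg (by exact_mod_cast h)]; omega
  rw [hcount]
  unfold pvE
  rw [List.map_map]
  apply List.map_congr_left
  intro j _
  show PySem.List.pyGetD s (0 + 2 * (j : Int)) 0 = s.getD (2 * j) 0
  rw [show (0 + 2 * (j : Int)) = ((2 * j : Nat) : Int) by push_cast; ring]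
  exact PySem.List.pyGetD_natCast s (2 * j) 0

lemma odds_eq (s : List Int) :
    (PySem.List.pyRange 1 (s.length : Int) 2).map (fun i => PySem.List.pyGetD s i 0) =
      pvO s s.length := by
  rw [PySem.List.pyRange_of_pos 1 (s.length : Int) (by norm_num)]
  have hcount : (if (1:Int) < (s.length : Int) then (((s.length : Int) - 1 + 2 - 1) / 2).toNat else 0)
      = s.length / 2 := by
    by_cases h : 1 < s.length
    · rw [if_pos (by exact_mod_cast h)]; omega
    · rw [if_neg (by exact_mod_cast h)]; omega
  rw [hcount]
  unfold pvO
  rw [List.map_map]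
  apply List.map_congr_left
  intro j _
  show PySem.List.pyGetD s (1 + 2 * (j : Int)) 0 = s.getD (2 * j + 1) 0
  rw [show (1 + 2 * (j : Int)) = ((2 * j + 1 : Nat) : Int) by push_cast; ring]
  exact PySem.List.pyGetD_natCast s (2 * j + 1) 0

-- ===== VERDICT (by name: the statement is the Claim_ definition above) =====
theorem seperateArray_spec : Claim_equal_seperateArray := by
  intro array _
  unfold Spec_seperateArray seperateArray seperateArray_alt
  by_cases hodd : PySem.Int.mod (PySem.List.len array) 2 ≠ 0
  · rw [if_pos hodd, if_pos hodd]
  · rw [if_neg hodd, if_neg hodd]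
    set s := PySem.List.sorted array (fun x => x) false with hsdef
    have hsorted : s.Pairwise (· ≤ ·) := PySem.List.sorted_pairwise array (fun x => x)
    simp only [PySem.List.len_eq, loopInv]
    by_cases hbad : pvBad s s.length = true
    · have hany := (counts_any_iff s).mpr ((pvBad_iff_count s hsorted).mp hbad)
      simp only [hbad, hany, if_true]
    · have hbf : pvBad s s.length = false := by simpa using hbad
      have hcf : ((s.foldl (fun d v => d.insert v (d.getD v 0 + 1)) (PySem.Dict.empty : PySem.Dict Int Int)).values.any
          (fun c => decide (3 ≤ c))) = false := by
        rw [Bool.eq_false_iff]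
        intro hc
        exact hbad ((pvBad_iff_count s hsorted).mpr ((counts_any_iff s).mp hc))
      simp only [hbf, hcf, Bool.false_eq_true, if_false]
      rw [evens_eq s, odds_eq s]
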